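-- pv_equiv track=rewrite | github.com/diogoabnunes/FPRO | PEs/PE2/2.3. Formatting Strings.py | exactly
-- ===== SOURCE A (Python) =====
-- def exactly(s):
--     tup = ()
--     for i in range(len(s)-1):
--         for j in range(i+1,len(s)):
--             if s[i].isdigit() and s[j].isdigit() and int(s[i]) + int(s[j]) == 10:
--                 aux = s[i:j]
--                 if aux.count("?") == 3:
--                     tup += (s[i] + s[j],)
--                 else:
--                     tup = (s[i] + s[j],)
--                     return f"The sequence {s} is NOT OK with first violation with pair: {tup}"
--     return f"The sequence {s} is OK with the pairs: {tup}"
-- ===== SOURCE B (Python) =====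
-- def exactly(s):
--     # Prefix counts of '?' and precomputed digit positions: O(n + d^2) instead of O(n^3).
--     q = [0]
--     for ch in s:
--         q.append(q[-1] + (ch == "?"))
--     digs = [i for i, ch in enumerate(s) if ch.isdigit()]
--     tup = ()
--     for a in range(len(digs)):
--         i = digs[a]
--         for b in range(a + 1, len(digs)):
--             j = digs[b]
--             if int(s[i]) + int(s[j]) == 10:
--                 if q[j] - q[i] == 3:
--                     tup += (s[i] + s[j],)
--                 else:
--                     tup = (s[i] + s[j],)
--                     return f"The sequence {s} is NOT OK with first violation with pair: {tup}"
--     return f"The sequence {s} is OK with the pairs: {tup}"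
-- ===== Notes on version B (the rewrite author's own statement) =====
-- stated objective: faster
-- what changed: B precomputes a prefix-sum array of question-mark counts and the list of digit positions, then scans only digit-position pairs with an O(1) between-count per pair, instead of A's scan over all index pairs with a slice-and-count per pair.
import Mathlib
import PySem

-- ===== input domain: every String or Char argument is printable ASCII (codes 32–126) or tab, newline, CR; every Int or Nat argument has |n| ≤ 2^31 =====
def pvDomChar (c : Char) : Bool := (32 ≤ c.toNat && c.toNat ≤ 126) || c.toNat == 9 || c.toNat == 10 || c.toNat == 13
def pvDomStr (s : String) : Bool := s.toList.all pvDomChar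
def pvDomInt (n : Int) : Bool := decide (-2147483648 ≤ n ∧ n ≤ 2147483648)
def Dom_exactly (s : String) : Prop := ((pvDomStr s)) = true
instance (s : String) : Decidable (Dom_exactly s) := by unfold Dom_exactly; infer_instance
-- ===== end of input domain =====

-- B replaces A's cubic scan (all index pairs + a slice-and-count per pair) by prefix '?'-counts and a
-- precomputed digit-position list, iterating digit pairs only; equivalence of the RETURN value is proved.

-- shared f-string helpers: Python's str(tuple-of-str) repr; exact here because every element is two digit
-- characters (no quotes/escapes ever occur in the elements)
def digitInt (c : Char) : Int := (PySem.Int.ofChars? [c]).getD 0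

def tupRepr (tup : List (List Char)) : List Char :=
  match tup with
  | [] => "()".toList
  | [x] => "('".toList ++ x ++ "',)".toList
  | _ => "(".toList ++ PySem.Chars.join ", ".toList (tup.map (fun x => "'".toList ++ x ++ "'".toList)) ++ ")".toList

def okMsg (l : List Char) (tup : List (List Char)) : String :=
  String.ofList ("The sequence ".toList ++ l ++ " is OK with the pairs: ".toList ++ tupRepr tup)

def notOkMsg (l : List Char) (tup : List (List Char)) : String :=
  String.ofList ("The sequence ".toList ++ l ++ " is NOT OK with first violation with pair: ".toList ++ tupRepr tup)

-- ===== PORT A =====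
-- .error t models A's early 'return' (t is the one-pair tuple A rebinds before returning)
def aBody (l : List Char) (st : Except (List (List Char)) (List (List Char))) (i j : Int) :
    Except (List (List Char)) (List (List Char)) :=
  match st with
  | .error t => .error t
  | .ok tup =>
    let ci := PySem.List.pyGetD l i ' '
    let cj := PySem.List.pyGetD l j ' '
    if PySem.Chars.isdigit ci && PySem.Chars.isdigit cj && (digitInt ci + digitInt cj == 10) then
      if PySem.List.count (PySem.List.slice l (some i) (some j)) '?' == 3 then
        .ok (tup ++ [[ci, cj]])
      else
        .error [[ci, cj]]
    else .ok tup

def exactly (s : String) : String :=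
  let l := s.toList
  let n : Int := l.length
  match (PySem.List.pyRange 0 (n - 1) 1).foldl
      (fun st i => (PySem.List.pyRange (i + 1) n 1).foldl (fun st j => aBody l st i j) st)
      (.ok []) with
  | .error t => notOkMsg l t
  | .ok tup => okMsg l tup

-- ===== PORT B =====
def bStep (q : List Int) (ch : Char) : List Int :=
  q ++ [PySem.List.pyGetD q (-1) 0 + (if ch == '?' then 1 else 0)]

def bInner (l : List Char) (q : List Int) (i : Int)
    (st : Except (List (List Char)) (List (List Char))) (j : Int) :
    Except (List (List Char)) (List (List Char)) :=
  match st with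
  | .error t => .error t
  | .ok tup =>
    let ci := PySem.List.pyGetD l i ' '
    let cj := PySem.List.pyGetD l j ' '
    if digitInt ci + digitInt cj == 10 then
      if PySem.List.pyGetD q j 0 - PySem.List.pyGetD q i 0 == 3 then
        .ok (tup ++ [[ci, cj]])
      else
        .error [[ci, cj]]
    else .ok tup

-- the 'while rest:' loop of Source B: peel the first digit position, scan it against the rest
def bScan (l : List Char) (q : List Int) (tup : List (List Char)) :
    List Int → Except (List (List Char)) (List (List Char))
  | [] => .ok tup
  | i :: rest =>
    match rest.foldl (bInner l q i) (.ok tup) with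
    | .error t => .error t
    | .ok tup' => bScan l q tup' rest

def exactly_alt (s : String) : String :=
  let l := s.toList
  let q := l.foldl bStep [0]
  let digs := ((PySem.List.enumerate l 0).filter (fun p => PySem.Chars.isdigit p.2)).map (·.1)
  match bScan l q [] digs with
  | .error t => notOkMsg l t
  | .ok tup => okMsg l tup

-- ===== PRECONDITION & SPEC =====
def Spec_exactly (s : String) (out : String) : Prop := out = exactly_alt s
instance (s : String) (out : String) : Decidable (Spec_exactly s out) := by unfold Spec_exactly; infer_instance

-- ===== CLAIM (what is proved, stated in full; the proofs are below) =====
def Claim_equal_exactly : Prop := ∀ (s : String), Dom_exactly s → Spec_exactly s (exactly s)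

-- ===== LEMMAS AND PROOFS =====

-- all ordered pairs (earlier element, later element) of a list
def pairsOf : List Int → List (Int × Int)
  | [] => []
  | x :: r => r.map (fun y => (x, y)) ++ pairsOf r

theorem pairsOf_filter (pe : Int → Bool) :
    ∀ xs : List Int, pairsOf (xs.filter pe) = (pairsOf xs).filter (fun p => pe p.1 && pe p.2) := by
  intro xs
  induction xs with
  | nil => rfl
  | cons x r ih =>
    simp only [pairsOf, List.filter_append, List.filter_map, ← ih]
    by_cases hx : pe x = true
    · rw [List.filter_cons_of_pos hx]
      simp only [pairsOf]
      congr 2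
      apply List.filter_congr
      intro y _
      simp [hx]
    · simp only [Bool.not_eq_true] at hx
      rw [List.filter_cons_of_neg (by simp [hx])]
      have : List.filter ((fun p => pe (Prod.fst p) && pe p.2) ∘ fun y => (x, y)) r = [] := by
        apply List.filter_eq_nil_iff.mpr
        intro y _
        simp [hx]
      rw [this]
      simp

theorem mem_pairsOf_lt {p : Int × Int} :
    ∀ {xs : List Int}, xs.Pairwise (· < ·) → p ∈ pairsOf xs → p.1 < p.2 ∧ p.1 ∈ xs ∧ p.2 ∈ xs := by
  intro xs
  induction xs with
  | nil => intro _ h; simp [pairsOf] at h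
  | cons x r ih =>
    intro hpw hp
    rw [List.pairwise_cons] at hpw
    simp only [pairsOf, List.mem_append, List.mem_map] at hp
    rcases hp with ⟨y, hy, rfl⟩ | hp
    · exact ⟨hpw.1 y hy, by simp, by simp [hy]⟩
    · obtain ⟨h1, h2, h3⟩ := ih hpw.2 hp
      exact ⟨h1, by simp [h2], by simp [h3]⟩

theorem foldl_pairs_range {α : Type} (h : α → Int → Int → α) (n : Int) :
    ∀ (k : Nat) (a : Int) (init : α), (n - a).toNat = k →
      (PySem.List.pyRange a n 1).foldl
        (fun st i => (PySem.List.pyRange (i + 1) n 1).foldl (fun st j => h st i j) st) init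
      = (pairsOf (PySem.List.pyRange a n 1)).foldl (fun st p => h st p.1 p.2) init := by
  intro k
  induction k with
  | zero =>
    intro a init hk
    have : n ≤ a := by omega
    rw [PySem.List.pyRange_one_eq_nil this]
    rfl
  | succ m ih =>
    intro a init hk
    have ha : a < n := by omega
    rw [PySem.List.pyRange_one_cons ha]
    simp only [pairsOf, List.foldl_cons, List.foldl_append, List.foldl_map]
    rw [ih (a + 1) _ (by omega)]

theorem foldl_error {α β : Type} (g : Except α α → β → Except α α)
    (h : ∀ t x, g (.error t) x = .error t) :
    ∀ (l : List β) (t : α), l.foldl g (.error t) = .error t := by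
  intro l
  induction l with
  | nil => intro t; rfl
  | cons x r ih => intro t; simp only [List.foldl_cons, h]; exact ih t

theorem foldl_filter_skip {α β : Type} (f : β → α → β) (p : α → Bool)
    (h : ∀ st x, p x = false → f st x = st) :
    ∀ (l : List α) (st : β), l.foldl f st = (l.filter p).foldl f st := by
  intro l
  induction l with
  | nil => intro st; rfl
  | cons x r ih =>
    intro st
    by_cases hx : p x = true
    · simp [List.filter, hx, List.foldl, ih]
    · simp only [Bool.not_eq_true] at hx
      simp [List.filter, hx, List.foldl, h st x hx, ih]

theorem bScan_eq_foldl (l : List Char) (q : List Int) :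
    ∀ (ds : List Int) (tup : List (List Char)),
      bScan l q tup ds = (pairsOf ds).foldl (fun st p => bInner l q p.1 st p.2) (.ok tup) := by
  intro ds
  induction ds with
  | nil => intro tup; rfl
  | cons i rest ih =>
    intro tup
    simp only [bScan, pairsOf, List.foldl_append, List.foldl_map]
    rcases hres : rest.foldl (bInner l q i) (Except.ok tup) with t | tup'
    · show Except.error t = _
      exact (foldl_error _ (fun t x => rfl) _ t).symm
    · exact ih tup'

theorem bStep_foldl :
    ∀ (l : List Char) (q0 : List Int) (c0 : Int), q0.getLast? = some c0 →
      l.foldl bStep q0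
        = q0 ++ (List.range l.length).map (fun k => c0 + ((l.take (k + 1)).count '?' : Int)) := by
  intro l
  induction l with
  | nil => intro q0 c0 _; simp
  | cons ch r ih =>
    intro q0 c0 hl
    have hq0 : q0 ≠ [] := by intro h; subst h; simp at hl
    have hstep : bStep q0 ch = q0 ++ [c0 + (if ch == '?' then 1 else 0)] := by
      unfold bStep
      rw [PySem.List.pyGetD_neg_one q0 0 hq0]
      rw [List.getLast_eq_iff_getLast?_eq_some hq0 |>.mpr hl]
    simp only [List.foldl_cons, hstep]
    rw [ih _ (c0 + (if ch == '?' then 1 else 0)) (by simp)]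
    simp only [List.length_cons, List.range_succ_eq_map, List.map_cons, List.map_map,
      List.append_assoc, List.singleton_append]
    congr 1
    congr 1
    · by_cases h : ch = '?' <;> simp [h]
    · apply List.map_congr_left
      intro k _
      simp only [Function.comp_apply, List.take_succ_cons, List.count_cons]
      by_cases h : ch = '?'
      · simp [h]; push_cast; ring
      · simp [h]

theorem q_char (l : List Char) :
    l.foldl bStep [0]
      = (List.range (l.length + 1)).map (fun k => (((l.take k).count '?' : Nat) : Int)) := by
  rw [bStep_foldl l [0] 0 rfl]
  rw [List.range_succ_eq_map, List.map_cons, List.map_map]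
  simp

theorem getD_q (l : List Char) (i j : Int) (h0 : 0 ≤ i) (hij : i ≤ j) (hj : j ≤ (l.length : Int)) :
    PySem.List.pyGetD (l.foldl bStep [0]) j 0 - PySem.List.pyGetD (l.foldl bStep [0]) i 0
      = (((PySem.List.slice l (some i) (some j)).count '?' : Nat) : Int) := by
  rw [q_char]
  have h0j : (0:Int) ≤ j := le_trans h0 hij
  have hlen : ((List.range (l.length + 1)).map
      (fun k => (((l.take k).count '?' : Nat) : Int))).length = l.length + 1 := by simp
  rw [PySem.List.pyGetD_eq_getElem _ 0 h0j (by rw [hlen]; push_cast; omega),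
      PySem.List.pyGetD_eq_getElem _ 0 h0 (by rw [hlen]; push_cast; omega)]
  simp only [List.getElem_map, List.getElem_range]
  rw [PySem.List.slice_toNat l h0 h0j]
  have hsplit : l.take j.toNat = l.take i.toNat ++ ((l.drop i.toNat).take (j.toNat - i.toNat)) := by
    rw [← List.take_add]
    congr 1
    omega
  rw [hsplit, List.count_append]
  push_cast
  ring

theorem main_state (l : List Char) :
    (PySem.List.pyRange 0 ((l.length : Int) - 1) 1).foldl
        (fun st i => (PySem.List.pyRange (i + 1) (l.length : Int) 1).foldl
          (fun st j => aBody l st i j) st) (.ok [])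
      = bScan l (l.foldl bStep [0]) []
          (((PySem.List.enumerate l 0).filter (fun p => PySem.Chars.isdigit p.2)).map (·.1)) := by
  set n : Int := (l.length : Int) with hn
  set pe : Int → Bool := fun i => PySem.Chars.isdigit (PySem.List.pyGetD l i ' ') with hpe
  -- 1. extend the outer range from [0, n-1) to [0, n): the added iteration has an empty inner range
  have hext : (PySem.List.pyRange 0 (n - 1) 1).foldl
        (fun st i => (PySem.List.pyRange (i + 1) n 1).foldl (fun st j => aBody l st i j) st)
        (Except.ok [])
      = (PySem.List.pyRange 0 n 1).foldl
        (fun st i => (PySem.List.pyRange (i + 1) n 1).foldl (fun st j => aBody l st i j) st)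
        (Except.ok []) := by
    rcases eq_or_lt_of_le (show (0:Int) ≤ n by positivity) with h | h
    · rw [PySem.List.pyRange_one_eq_nil (by omega), PySem.List.pyRange_one_eq_nil (by omega)]
    · have h1 : (0:Int) ≤ n - 1 := by omega
      rw [show n = (n - 1) + 1 by ring, PySem.List.pyRange_one_succ_right h1,
        List.foldl_append]
      simp only [List.foldl_cons, List.foldl_nil]
      rw [show n - 1 + 1 = n by ring, PySem.List.pyRange_one_eq_nil (le_refl n)]
      rfl
  rw [hext]
  -- 2. flatten the nested loops into a fold over all ordered index pairs
  rw [foldl_pairs_range (fun st i j => aBody l st i j) n (n - 0).toNat 0 (Except.ok []) rfl]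
  -- 3. non-digit pairs are skipped by A's body
  rw [foldl_filter_skip _ (fun p => pe p.1 && pe p.2)
    (by
      intro st pr hpr
      rcases st with t | tup
      · rfl
      · simp only [aBody]
        simp only [hpe, Bool.and_eq_false_iff] at hpr
        rcases hpr with h | h <;> simp [h])]
  -- 4. pairs of the filtered range = pairs of the digit-position list
  rw [← pairsOf_filter pe]
  -- 5. the digit-position list of B is the filtered range
  have hdigs : ((PySem.List.enumerate l 0).filter (fun p => PySem.Chars.isdigit p.2)).map (·.1)
      = (PySem.List.pyRange 0 n 1).filter pe := by
    rw [PySem.List.enumerate_eq_map_pyRange l ' ', List.filter_map, List.map_map]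
    simp [Function.comp_def, PySem.List.len_eq, hpe]
    rw [hn]
  rw [← hdigs]
  -- 6. on digit pairs, A's body equals B's body (prefix counts replace the slice count)
  rw [PySem.List.foldl_congr_mem' _ _ (fun st p => bInner l (l.foldl bStep [0]) p.1 st p.2) _
    (by
      intro pr hpr st
      rw [hdigs] at hpr
      have hmem := mem_pairsOf_lt ((PySem.List.pairwise_lt_pyRange_one 0 n).filter pe) hpr
      obtain ⟨hlt, h1, h2⟩ := hmem
      rw [List.mem_filter, PySem.List.mem_pyRange_one] at h1 h2
      rcases st with t | tup
      · rfl
      · simp only [aBody, bInner, hpe] at *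
        rw [h1.2, h2.2]
        simp only [Bool.true_and]
        rw [getD_q l pr.1 pr.2 (by omega) (by omega) (by omega)]
        have hcast : ∀ c : Nat, (((c : Nat) : Int) == (3:Int)) = (c == 3) := by
          intro c
          by_cases h : c = 3
          · subst h; rfl
          · have h1 : ((c : Nat) : Int) ≠ 3 := by omega
            simp [h, h1]
        rw [hcast]
        rfl)]
  -- 7. fold back into B's scan
  rw [← bScan_eq_foldl]

-- ===== VERDICT (by name: the statement is the Claim_ definition above) =====
theorem exactly_spec : Claim_equal_exactly := by
  intro s _
  unfold Spec_exactly exactly exactly_alt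
  simp only []
  rw [main_state s.toList]
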